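-- pv_equiv track=rewrite | github.com/AtharvaM7/Random_interesting | listcompression.py | fig_co
-- ===== SOURCE A (Python) =====
-- def fig_co(list):
--     '''This function takes a list of ruld moves and converts it to coordinates such that we start from 1,1'''
--     #Defining a list to store tuples of (x,y)
--     store=[]
--     #define x and y coordinates
--     x=0
--     y=0
--     #update the initial position
--     store.append((y,x))
--     #x increases whe we go to right and decreasesw when we go to left
--     #y increases when we go down and decreases when we go up
--     for i in range(len(list)):
--         if list[i]=='r':
--             x=x+1
--         elif list[i]=='l':
--             x=x-1
--         elif list[i]=='d':
--             y=y+1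
--         elif list[i]=='u':
--             y=y-1
--         store.append((y,x))
--     return store
-- ===== SOURCE B (Python) =====
-- def _prefix_sums(deltas):
--     '''Running totals of deltas, starting from 0 (len(deltas)+1 values).'''
--     out = [0]
--     t = 0
--     for d in deltas:
--         t += d
--         out.append(t)
--     return out
--
--
-- def fig_co(list):
--     '''Axis-separated decomposition: compute the y-axis and x-axis trajectories
--     as two independent prefix-sum scans of numeric per-move deltas (boolean
--     arithmetic, no branching), then zip them into the (y, x) path.'''
--     ys = _prefix_sums([(m == 'd') - (m == 'u') for m in list])
--     xs = _prefix_sums([(m == 'r') - (m == 'l') for m in list])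
--     return [*zip(ys, xs)]
-- ===== Notes on version B (the rewrite author's own statement) =====
-- stated objective: alternative
-- what changed: Replaces A's single stateful loop over indices with an if/elif chain updating an (x,y) pair by an axis-separated scheme: each axis is mapped to numeric deltas via boolean arithmetic, prefix-summed independently, and the two trajectories are zipped into the path.
import Mathlib
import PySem

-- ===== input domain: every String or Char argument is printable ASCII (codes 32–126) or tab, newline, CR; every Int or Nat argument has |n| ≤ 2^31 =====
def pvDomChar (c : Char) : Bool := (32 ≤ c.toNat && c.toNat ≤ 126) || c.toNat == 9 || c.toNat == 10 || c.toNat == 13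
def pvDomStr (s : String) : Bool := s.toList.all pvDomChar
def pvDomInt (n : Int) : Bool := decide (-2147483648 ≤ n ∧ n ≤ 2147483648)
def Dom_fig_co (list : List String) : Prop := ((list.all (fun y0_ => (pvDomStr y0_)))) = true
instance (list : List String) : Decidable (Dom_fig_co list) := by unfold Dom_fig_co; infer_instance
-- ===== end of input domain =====

-- B is an alternative of the same cost: two independent per-axis prefix-sum scans zipped into the path,
-- instead of A's single indexed loop with explicit x/y state and an if/elif chain.

-- ===== PORT A =====
-- loop body of A, after the element lookup list[i]: update (x, y) by the elif chain, append (y, x)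
def pvBodyA (st : List (Int × Int) × Int × Int) (e : String) : List (Int × Int) × Int × Int :=
  let store := st.1
  let x := st.2.1
  let y := st.2.2
  let xy : Int × Int :=
    if e = "r" then (x + 1, y)
    else if e = "l" then (x - 1, y)
    else if e = "d" then (x, y + 1)
    else if e = "u" then (x, y - 1)
    else (x, y)
  (store ++ [(xy.2, xy.1)], xy.1, xy.2)

def fig_co (list : List String) : List (Int × Int) :=
  ((PySem.List.pyRange 0 list.length 1).foldl
      (fun st i => pvBodyA st (PySem.List.pyGetD list i ""))
      ([((0 : Int), (0 : Int))], (0 : Int), (0 : Int))).1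

-- ===== PORT B =====
-- _prefix_sums: out = [0]; t = 0; for d in deltas: t += d; out.append(t)
def pvPrefixSums (deltas : List Int) : List Int :=
  (deltas.foldl (fun st d => (st.1 ++ [st.2 + d], st.2 + d)) ([(0 : Int)], (0 : Int))).1

-- (m == 'd') - (m == 'u')  /  (m == 'r') - (m == 'l')  with Python bool arithmetic
def pvDy (m : String) : Int := (if m = "d" then 1 else 0) - (if m = "u" then 1 else 0)
def pvDx (m : String) : Int := (if m = "r" then 1 else 0) - (if m = "l" then 1 else 0)

def fig_co_alt (list : List String) : List (Int × Int) :=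
  let ys := pvPrefixSums (list.map pvDy)
  let xs := pvPrefixSums (list.map pvDx)
  List.zip ys xs

-- ===== PRECONDITION & SPEC =====
def Spec_fig_co (list : List String) (out : List (Int × Int)) : Prop := out = fig_co_alt list
instance (list : List String) (out : List (Int × Int)) : Decidable (Spec_fig_co list out) := by unfold Spec_fig_co; infer_instance

-- ===== CLAIM (what is proved, stated in full; the proofs are below) =====
def Claim_equal_fig_co : Prop := ∀ (list : List String), Dom_fig_co list → Spec_fig_co list (fig_co list)

-- ===== LEMMAS AND PROOFS =====

-- common characterisation: the (y, x) path starting from (y, x)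
def pvPath : List String → Int → Int → List (Int × Int)
  | [], y, x => [(y, x)]
  | m :: t, y, x => (y, x) :: pvPath t (y + pvDy m) (x + pvDx m)

lemma pvPath_head_tail (l : List String) (y x : Int) :
    (y, x) :: (pvPath l y x).tail = pvPath l y x := by
  cases l <;> rfl

lemma pvBodyA_delta (store : List (Int × Int)) (x y : Int) (e : String) :
    pvBodyA (store, x, y) e =
      (store ++ [(y + pvDy e, x + pvDx e)], x + pvDx e, y + pvDy e) := by
  by_cases h1 : e = "r" <;> by_cases h2 : e = "l" <;> by_cases h3 : e = "d" <;>
    by_cases h4 : e = "u" <;>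
    simp_all [pvBodyA, pvDy, pvDx] <;> omega

lemma pv_foldA (l : List String) (store : List (Int × Int)) (x y : Int) :
    (l.foldl pvBodyA (store, x, y)).1 = store ++ (pvPath l y x).tail := by
  induction l generalizing store x y with
  | nil => simp [pvPath]
  | cons m t ih =>
    simp only [List.foldl_cons, pvBodyA_delta, pvPath, List.tail_cons]
    rw [ih]
    rw [← pvPath_head_tail t (y + pvDy m) (x + pvDx m)]
    simp

-- scan characterisation of _prefix_sums
def pvScanL : List Int → Int → List Int
  | [], t => [t]
  | d :: ds, t => t :: pvScanL ds (t + d)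

lemma pvScanL_head_tail (ds : List Int) (t : Int) :
    t :: (pvScanL ds t).tail = pvScanL ds t := by
  cases ds <;> rfl

lemma pv_foldScan (ds : List Int) (acc : List Int) (t : Int) :
    (ds.foldl (fun st d => (st.1 ++ [st.2 + d], st.2 + d)) (acc, t)).1 =
      acc ++ (pvScanL ds t).tail := by
  induction ds generalizing acc t with
  | nil => simp [pvScanL]
  | cons d ds ih =>
    simp only [List.foldl_cons, pvScanL, List.tail_cons]
    rw [ih]
    rw [← pvScanL_head_tail ds (t + d)]
    simp

lemma pvPrefixSums_eq (ds : List Int) : pvPrefixSums ds = pvScanL ds 0 := by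
  unfold pvPrefixSums
  rw [pv_foldScan]
  exact pvScanL_head_tail ds 0

lemma pv_zip_path (l : List String) (y x : Int) :
    List.zip (pvScanL (l.map pvDy) y) (pvScanL (l.map pvDx) x) = pvPath l y x := by
  induction l generalizing y x with
  | nil => rfl
  | cons m t ih =>
    simp only [List.map_cons, pvScanL, pvPath, List.zip_cons_cons, ih]

-- ===== VERDICT (by name: the statement is the Claim_ definition above) =====
theorem fig_co_spec : Claim_equal_fig_co := by
  intro list _
  unfold Spec_fig_co fig_co fig_co_alt
  rw [PySem.List.foldl_pyRange_zero_pyGetD' list "" pvBodyA]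
  rw [pv_foldA list [((0 : Int), (0 : Int))] 0 0]
  rw [pvPrefixSums_eq, pvPrefixSums_eq, pv_zip_path]
  exact pvPath_head_tail list 0 0
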